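-- pv_equiv track=rewrite | github.com/kyle-he/top-py | top.py | to_top
-- ===== SOURCE A (Python) =====
-- CHARACTER_VALUES = {
--     200: "😼",
--     50: "💪",
--     10: "💦",
--     5: "😈",
--     1: ",",
--     0: "👊"
-- }
--
-- SECTION_SEPERATOR = '💸💸'
--
-- def to_top(text: str) -> str:
--     out = bytearray()
--
--     for char in text.encode():
--         while char != 0:
--             for value, emoji in CHARACTER_VALUES.items():
--                 if char >= value:
--                     char -= value
--                     out += emoji.encode()
--                     break
--
--         out += SECTION_SEPERATOR.encode()
--
--     return out.decode('utf-8')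
-- ===== SOURCE B (Python) =====
-- def to_top(text: str) -> str:
--     parts = []
--     for b in text.encode():
--         parts.append('\U0001F63C' * (b // 200)
--                      + '\U0001F4AA' * (b % 200 // 50)
--                      + '\U0001F4A6' * (b % 50 // 10)
--                      + '\U0001F608' * (b % 10 // 5)
--                      + ',' * (b % 5)
--                      + '\U0001F4B8\U0001F4B8')
--     return ''.join(parts)
-- ===== Notes on version B (the rewrite author's own statement) =====
-- stated objective: simpler
-- what changed: Replaces the greedy subtract-in-a-while-loop per byte with a closed-form chunk built by integer division/modulus and string repetition, joined once.
import Mathlib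
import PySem

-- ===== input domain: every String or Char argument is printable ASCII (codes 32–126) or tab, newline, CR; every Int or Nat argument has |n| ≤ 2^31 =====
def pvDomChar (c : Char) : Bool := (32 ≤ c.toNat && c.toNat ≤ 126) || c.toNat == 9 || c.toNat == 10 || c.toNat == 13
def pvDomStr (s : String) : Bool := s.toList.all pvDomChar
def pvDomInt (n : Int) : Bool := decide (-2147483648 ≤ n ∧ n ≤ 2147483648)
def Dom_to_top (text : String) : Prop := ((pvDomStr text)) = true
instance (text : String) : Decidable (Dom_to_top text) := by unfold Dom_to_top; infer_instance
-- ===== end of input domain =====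

-- B is simpler: the greedy subtract-while-loop per byte is replaced by a closed-form
-- chunk computed with integer division/modulus; return value only (no side effects).
-- On the ASCII domain Dom_to_top, text.encode() yields exactly the char codes.

-- ===== PORT A =====
-- A's while-loop on a byte b: each pass appends the first emoji whose value ≤ b and
-- subtracts that value; it removes at least 1 per pass, so fuel = b suffices (the
-- 0-entry '👊' of CHARACTER_VALUES is unreachable since the loop runs only while b ≠ 0,
-- hence the 1-branch ',' always fires last in the chain).
def to_topChunkA : Nat → Nat → List Char
  | 0, _ => []
  | fuel + 1, b =>
    if b = 0 then []
    else if 200 ≤ b then '😼' :: to_topChunkA fuel (b - 200)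
    else if 50 ≤ b then '💪' :: to_topChunkA fuel (b - 50)
    else if 10 ≤ b then '💦' :: to_topChunkA fuel (b - 10)
    else if 5 ≤ b then '😈' :: to_topChunkA fuel (b - 5)
    else ',' :: to_topChunkA fuel (b - 1)

def to_top (text : String) : String :=
  String.mk (text.toList.foldl
    (fun out c => out ++ to_topChunkA c.toNat c.toNat ++ ['💸', '💸']) [])

-- ===== PORT B =====
def to_topChunkB (b : Nat) : List Char :=
  List.replicate (b / 200) '😼'
    ++ List.replicate (b % 200 / 50) '💪'
    ++ List.replicate (b % 50 / 10) '💦'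
    ++ List.replicate (b % 10 / 5) '😈'
    ++ List.replicate (b % 5) ','
    ++ ['💸', '💸']

def to_top_alt (text : String) : String :=
  String.mk ((text.toList.map (fun c => to_topChunkB c.toNat)).flatten)

-- ===== PRECONDITION & SPEC =====
def Spec_to_top (text : String) (out : String) : Prop := out = to_top_alt text
instance (text : String) (out : String) : Decidable (Spec_to_top text out) := by unfold Spec_to_top; infer_instance

-- ===== CLAIM (what is proved, stated in full; the proofs are below) =====
def Claim_equal_to_top : Prop := ∀ (text : String), Dom_to_top text → Spec_to_top text (to_top text)

-- ===== LEMMAS AND PROOFS =====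

-- per-byte agreement on the domain's byte range (codes ≤ 126)
theorem to_topChunk_eq : ∀ b : Fin 127,
    to_topChunkA b.val b.val ++ ['💸', '💸'] = to_topChunkB b.val := by decide

theorem to_top_spec_aux (l : List Char) (h : ∀ c ∈ l, pvDomChar c = true) :
    l.foldl (fun out c => out ++ to_topChunkA c.toNat c.toNat ++ ['💸', '💸']) []
      = (l.map (fun c => to_topChunkB c.toNat)).flatten := by
  have hrw : l.foldl (fun out c => out ++ to_topChunkA c.toNat c.toNat ++ ['💸', '💸']) []
      = l.foldl (fun out c => out ++ (to_topChunkA c.toNat c.toNat ++ ['💸', '💸'])) [] := by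
    simp [List.append_assoc]
  rw [hrw, PySem.List.foldl_append_eq_flatMap, List.nil_append, List.flatMap_def]
  congr 1
  apply List.map_congr_left
  intro c hc
  have hd := h c hc
  have hlt : c.toNat < 127 := by
    simp [pvDomChar] at hd
    omega
  exact to_topChunk_eq ⟨c.toNat, hlt⟩

-- ===== VERDICT (by name: the statement is the Claim_ definition above) =====
theorem to_top_spec : Claim_equal_to_top := by
  intro text hdom
  unfold Spec_to_top to_top to_top_alt
  have h : ∀ c ∈ text.toList, pvDomChar c = true := by
    simpa [Dom_to_top, pvDomStr, List.all_eq_true] using hdom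
  rw [to_top_spec_aux text.toList h]
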